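-- pv_equiv track=rewrite | github.com/HalfzwareLinda/sovereign-agents | provision_agent.py | _decode_bech32
-- ===== SOURCE A (Python) =====
-- BECH32_CHARSET = "qpzry9x8gf2tvdw0s3jn54khce6mua7l"
--
-- def _convertbits(data, frombits, tobits, pad=True):
--     acc, bits, ret = 0, 0, []
--     maxv = (1 << tobits) - 1
--     for value in data:
--         acc = (acc << frombits) | value
--         bits += frombits
--         while bits >= tobits:
--             bits -= tobits
--             ret.append((acc >> bits) & maxv)
--     if pad and bits:
--         ret.append((acc << (tobits - bits)) & maxv)
--     return ret
--
-- def _decode_bech32(hrp_expected: str, bech32_str: str) -> str | None: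
--     """Decode a bech32 string (nsec/npub) to hex. Minimal implementation."""
--     try:
--         if not bech32_str.startswith(hrp_expected + "1"):
--             return None
--         data_part = bech32_str[len(hrp_expected) + 1:]
--         data_5bit = [BECH32_CHARSET.index(c) for c in data_part[:-6]]  # strip checksum
--         data_8bit = _convertbits(data_5bit, 5, 8, pad=False)
--         return bytes(data_8bit).hex()
--     except Exception:
--         return None
-- ===== SOURCE B (Python) =====
-- BECH32_CHARSET = "qpzry9x8gf2tvdw0s3jn54khce6mua7l"
--
-- def _decode_bech32(hrp_expected: str, bech32_str: str) -> str | None: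
--     """Decode a bech32 string (nsec/npub) to hex, folding the data into one big integer."""
--     try:
--         if not bech32_str.startswith(hrp_expected + "1"):
--             return None
--         data_part = bech32_str[len(hrp_expected) + 1:]
--         acc = 0
--         count = 0
--         for c in data_part[:-6]:  # strip checksum
--             acc = (acc << 5) | BECH32_CHARSET.index(c)  # raises on invalid char
--             count += 1
--         nbytes = (5 * count) // 8
--         acc >>= 5 * count - 8 * nbytes  # drop leftover low bits (pad=False)
--         return acc.to_bytes(nbytes, 'big').hex()
--     except Exception:
--         return None
-- ===== Notes on version B (the rewrite author's own statement) =====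
-- stated objective: alternative
-- what changed: Replaces the incremental _convertbits 5-to-8-bit regrouping loop plus bytes().hex() with a single pass that folds all 5-bit values into one big integer, drops the leftover low bits with one shift, and renders it via to_bytes().hex().
import Mathlib
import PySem

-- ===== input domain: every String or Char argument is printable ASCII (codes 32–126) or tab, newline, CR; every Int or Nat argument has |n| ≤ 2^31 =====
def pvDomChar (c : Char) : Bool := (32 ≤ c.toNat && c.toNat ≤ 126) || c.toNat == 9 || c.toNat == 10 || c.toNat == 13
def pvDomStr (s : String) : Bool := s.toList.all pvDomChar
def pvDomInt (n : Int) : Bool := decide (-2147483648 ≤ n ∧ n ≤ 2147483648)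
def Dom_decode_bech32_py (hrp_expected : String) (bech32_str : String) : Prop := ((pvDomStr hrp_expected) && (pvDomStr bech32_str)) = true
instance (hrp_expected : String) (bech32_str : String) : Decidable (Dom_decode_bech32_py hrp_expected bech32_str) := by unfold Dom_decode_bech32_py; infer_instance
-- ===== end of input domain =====

-- B folds the 5-bit values into one big integer and renders it as padded hex,
-- instead of A's incremental _convertbits byte-list regrouping; alternative decomposition, same cost.


-- ===== PORT A =====
def pvCharset : String := "qpzry9x8gf2tvdw0s3jn54khce6mua7l"

def hexDigit (n : Nat) : Char := ("0123456789abcdef".toList).getD n ' '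

-- bytes(data_8bit).hex(): two lowercase hex digits per byte (exact: every produced byte is < 256)
def bytesHexL (bs : List Nat) : List Char :=
  bs.flatMap (fun b => [hexDigit (b / 16), hexDigit (b % 16)])

-- the inner 'while bits >= tobits' loop of _convertbits (0 < tobits is a totality guard; A only calls tobits = 8)
def cbWhile (tobits maxv acc : Nat) (bits : Nat) (ret : List Nat) : Nat × List Nat :=
  if h : tobits ≤ bits ∧ 0 < tobits then
    cbWhile tobits maxv acc (bits - tobits) (ret ++ [(acc >>> (bits - tobits)) &&& maxv])
  else (bits, ret)
termination_by bits
decreasing_by omega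

-- the body of _convertbits' for-loop
def cbStep (frombits tobits maxv : Nat) (st : Nat × Nat × List Nat) (v : Nat) : Nat × Nat × List Nat :=
  let acc := (st.1 <<< frombits) ||| v
  let br := cbWhile tobits maxv acc (st.2.1 + frombits) st.2.2
  (acc, br.1, br.2)

def convertbits (data : List Nat) (frombits tobits : Nat) (pad : Bool) : List Nat :=
  let maxv := (1 <<< tobits) - 1
  let st := data.foldl (cbStep frombits tobits maxv) (0, 0, [])
  if pad && st.2.1 ≠ 0 then st.2.2 ++ [(st.1 <<< (tobits - st.2.1)) &&& maxv] else st.2.2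

def decode_bech32_py (hrp_expected : String) (bech32_str : String) : Option String :=
  let pfx := hrp_expected ++ "1"
  if PySem.Str.startswith bech32_str pfx = false then none
  else
    let data_part := PySem.List.slice bech32_str.toList (some ((hrp_expected.length : Int) + 1)) none
    let body := PySem.List.slice data_part none (some (-6 : Int))
    -- [BECH32_CHARSET.index(c) for c in ...]: a ValueError is caught by the except → None
    match body.mapM (fun c => PySem.List.index? pvCharset.toList c) with
    | none => none
    | some data5 => some (String.ofList (bytesHexL (convertbits data5 5 8 false)))

-- ===== PORT B =====
-- acc.to_bytes(nbytes,'big').hex(): exactly 2*nbytes lowercase hex digits, big-endian (exact: acc < 256^nbytes)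
def hexPadL : Nat → Nat → List Char
  | _, 0 => []
  | n, d + 1 => hexPadL (n / 16) d ++ [hexDigit (n % 16)]

-- B's for-loop: fold each 5-bit value into acc, counting; invalid char → None
def altLoop : List Char → Nat → Nat → Option (Nat × Nat)
  | [], acc, n => some (acc, n)
  | c :: cs, acc, n =>
    match PySem.List.index? pvCharset.toList c with
    | none => none
    | some v => altLoop cs ((acc <<< 5) ||| v) (n + 1)

def decode_bech32_py_alt (hrp_expected : String) (bech32_str : String) : Option String :=
  let pfx := hrp_expected ++ "1"
  if PySem.Str.startswith bech32_str pfx = false then none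
  else
    let data_part := PySem.List.slice bech32_str.toList (some ((hrp_expected.length : Int) + 1)) none
    match altLoop (PySem.List.slice data_part none (some (-6 : Int))) 0 0 with
    | none => none
    | some (acc, n) =>
      let nbytes := (5 * n) / 8
      some (String.ofList (hexPadL (acc >>> (5 * n - 8 * nbytes)) (2 * nbytes)))

-- ===== PRECONDITION & SPEC =====
def Spec_decode_bech32_py (hrp_expected : String) (bech32_str : String) (out : Option String) : Prop := out = decode_bech32_py_alt hrp_expected bech32_str
instance (hrp_expected : String) (bech32_str : String) (out : Option String) : Decidable (Spec_decode_bech32_py hrp_expected bech32_str out) := by unfold Spec_decode_bech32_py; infer_instance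

-- ===== CLAIM (what is proved, stated in full; the proofs are below) =====
def Claim_equal_decode_bech32_py : Prop := ∀ (hrp_expected : String) (bech32_str : String), Dom_decode_bech32_py hrp_expected bech32_str → Spec_decode_bech32_py hrp_expected bech32_str (decode_bech32_py hrp_expected bech32_str)

-- ===== LEMMAS AND PROOFS =====

-- every index returned by .index on the 32-char charset is < 32
lemma index_lt_32 {c : Char} {v : Nat} (h : PySem.List.index? pvCharset.toList c = some v) : v < 32 := by
  obtain ⟨hk, -, -⟩ := PySem.List.getElem_of_index?_eq_some h
  simpa [pvCharset] using hk

lemma lor_five {a v : Nat} (h : v < 32) : (a <<< 5) ||| v = a * 32 + v := by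
  rw [← Nat.shiftLeft_add_eq_or_of_lt h, Nat.shiftLeft_eq]

lemma bytesHexL_append (bs : List Nat) (b : Nat) :
    bytesHexL (bs ++ [b]) = bytesHexL bs ++ [hexDigit (b / 16), hexDigit (b % 16)] := by
  simp [bytesHexL]

lemma and255 (n : Nat) : n &&& 255 = n % 256 := Nat.and_two_pow_sub_one_eq_mod n 8

-- one step of _convertbits preserves the hex invariant
lemma cbStep_inv (v acc bits : Nat) (ret : List Nat) (hv : v < 32) (hb : bits < 8)
    (hhex : bytesHexL ret = hexPadL (acc >>> bits) (2 * ret.length)) :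
    (cbStep 5 8 255 (acc, bits, ret) v).1 = (acc <<< 5) ||| v ∧
    (cbStep 5 8 255 (acc, bits, ret) v).2.1 < 8 ∧
    8 * (cbStep 5 8 255 (acc, bits, ret) v).2.2.length + (cbStep 5 8 255 (acc, bits, ret) v).2.1
      = 8 * ret.length + bits + 5 ∧
    bytesHexL (cbStep 5 8 255 (acc, bits, ret) v).2.2
      = hexPadL ((cbStep 5 8 255 (acc, bits, ret) v).1 >>> (cbStep 5 8 255 (acc, bits, ret) v).2.1)
          (2 * (cbStep 5 8 255 (acc, bits, ret) v).2.2.length) := by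
  have hacc : (acc <<< 5) ||| v = acc * 32 + v := lor_five hv
  simp only [cbStep, hacc]
  interval_cases bits <;>
    rw [cbWhile] <;>
    simp only [Nat.reduceAdd, Nat.reduceLeDiff, show (0:Nat) < 8 by norm_num, and_true, true_and,
      dite_true, dite_false, Nat.reduceSub] 
  case «0» =>
    refine ⟨by norm_num, ?_⟩
    rw [hhex]
    congr 1
    simp only [Nat.shiftRight_eq_div_pow]
    norm_num
    omega
  case «1» =>
    refine ⟨by norm_num, ?_⟩
    rw [hhex]
    congr 1
    simp only [Nat.shiftRight_eq_div_pow]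
    norm_num
    omega
  case «2» =>
    refine ⟨by norm_num, ?_⟩
    rw [hhex]
    congr 1
    simp only [Nat.shiftRight_eq_div_pow]
    norm_num
    omega
  case «3» =>
    rw [cbWhile]
    simp only [Nat.reduceLeDiff, Nat.reduceSub, false_and, dite_false]
    refine ⟨by norm_num, by simp only [List.length_append, List.length_cons, List.length_nil]; omega, ?_⟩
    rw [bytesHexL_append, hhex]
    simp only [List.length_append, List.length_cons, List.length_nil, zero_add,
      show ∀ L : Nat, 2 * (L + 1) = 2 * L + 1 + 1 from fun L => by ring, hexPadL,
      and255, Nat.shiftRight_eq_div_pow, List.append_assoc, List.singleton_append]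
    norm_num
    congr 1
    · congr 1
      omega
    · congr 2 <;> omega
  case «4» =>
    rw [cbWhile]
    simp only [Nat.reduceLeDiff, Nat.reduceSub, false_and, dite_false]
    refine ⟨by norm_num, by simp only [List.length_append, List.length_cons, List.length_nil]; omega, ?_⟩
    rw [bytesHexL_append, hhex]
    simp only [List.length_append, List.length_cons, List.length_nil, zero_add,
      show ∀ L : Nat, 2 * (L + 1) = 2 * L + 1 + 1 from fun L => by ring, hexPadL,
      and255, Nat.shiftRight_eq_div_pow, List.append_assoc, List.singleton_append]
    norm_num
    congr 1
    · congr 1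
      omega
    · congr 2 <;> omega
  case «5» =>
    rw [cbWhile]
    simp only [Nat.reduceLeDiff, Nat.reduceSub, false_and, dite_false]
    refine ⟨by norm_num, by simp only [List.length_append, List.length_cons, List.length_nil]; omega, ?_⟩
    rw [bytesHexL_append, hhex]
    simp only [List.length_append, List.length_cons, List.length_nil, zero_add,
      show ∀ L : Nat, 2 * (L + 1) = 2 * L + 1 + 1 from fun L => by ring, hexPadL,
      and255, Nat.shiftRight_eq_div_pow, List.append_assoc, List.singleton_append]
    norm_num
    congr 1
    · congr 1
      omega
    · congr 2 <;> omega
  case «6» =>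
    rw [cbWhile]
    simp only [Nat.reduceLeDiff, Nat.reduceSub, false_and, dite_false]
    refine ⟨by norm_num, by simp only [List.length_append, List.length_cons, List.length_nil]; omega, ?_⟩
    rw [bytesHexL_append, hhex]
    simp only [List.length_append, List.length_cons, List.length_nil, zero_add,
      show ∀ L : Nat, 2 * (L + 1) = 2 * L + 1 + 1 from fun L => by ring, hexPadL,
      and255, Nat.shiftRight_eq_div_pow, List.append_assoc, List.singleton_append]
    norm_num
    congr 1
    · congr 1
      omega
    · congr 2 <;> omega
  case «7» =>
    rw [cbWhile]
    simp only [Nat.reduceLeDiff, Nat.reduceSub, false_and, dite_false]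
    refine ⟨by norm_num, by simp only [List.length_append, List.length_cons, List.length_nil]; omega, ?_⟩
    rw [bytesHexL_append, hhex]
    simp only [List.length_append, List.length_cons, List.length_nil, zero_add,
      show ∀ L : Nat, 2 * (L + 1) = 2 * L + 1 + 1 from fun L => by ring, hexPadL,
      and255, Nat.shiftRight_eq_div_pow, List.append_assoc, List.singleton_append]
    norm_num
    congr 1
    · congr 1
      omega
    · congr 2 <;> omega

-- the whole fold of _convertbits preserves the hex invariant
lemma conv_inv (vs : List Nat) : ∀ (acc bits : Nat) (ret : List Nat),
    (∀ v ∈ vs, v < 32) → bits < 8 →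
    bytesHexL ret = hexPadL (acc >>> bits) (2 * ret.length) →
    (vs.foldl (cbStep 5 8 255) (acc, bits, ret)).1
      = vs.foldl (fun a v => (a <<< 5) ||| v) acc ∧
    (vs.foldl (cbStep 5 8 255) (acc, bits, ret)).2.1 < 8 ∧
    8 * (vs.foldl (cbStep 5 8 255) (acc, bits, ret)).2.2.length + (vs.foldl (cbStep 5 8 255) (acc, bits, ret)).2.1
      = 8 * ret.length + bits + 5 * vs.length ∧
    bytesHexL (vs.foldl (cbStep 5 8 255) (acc, bits, ret)).2.2
      = hexPadL ((vs.foldl (cbStep 5 8 255) (acc, bits, ret)).1 >>> (vs.foldl (cbStep 5 8 255) (acc, bits, ret)).2.1)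
          (2 * (vs.foldl (cbStep 5 8 255) (acc, bits, ret)).2.2.length) := by
  induction vs with
  | nil => intro acc bits ret _ hb hhex; exact ⟨rfl, hb, by simp, hhex⟩
  | cons v vs ih =>
    intro acc bits ret hvs hb hhex
    obtain ⟨s1, s2, s3, s4⟩ := cbStep_inv v acc bits ret (hvs v (by simp)) hb hhex
    simp only [List.foldl_cons]
    obtain ⟨i1, i2, i3, i4⟩ := ih (cbStep 5 8 255 (acc, bits, ret) v).1
      (cbStep 5 8 255 (acc, bits, ret) v).2.1 (cbStep 5 8 255 (acc, bits, ret) v).2.2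
      (fun w hw => hvs w (by simp [hw])) s2 s4
    refine ⟨by rw [i1, s1], i2, by rw [i3]; simp only [List.length_cons]; omega, i4⟩

-- B's loop is A's lookup pass followed by the big-integer fold
lemma altLoop_eq (cs : List Char) : ∀ (acc n : Nat),
    altLoop cs acc n = (cs.mapM (fun c => List.idxOf? c pvCharset.toList)).map
      (fun vs => (vs.foldl (fun a v => (a <<< 5) ||| v) acc, n + vs.length)) := by
  induction cs with
  | nil => intro acc n; simp [altLoop]
  | cons c cs ih =>
    intro acc n
    cases hidx : List.idxOf? c pvCharset.toList with
    | none => simp [altLoop, List.mapM_cons, hidx]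
    | some v =>
      simp only [altLoop, List.mapM_cons, PySem.List.index?_eq_idxOf?, hidx, ih]
      cases h : cs.mapM (fun c => List.idxOf? c pvCharset.toList) with
      | none => simp [h]
      | some vs => simp [h]; omega

lemma mapM_lt_32 {cs : List Char} {vs : List Nat}
    (h : cs.mapM (fun c => List.idxOf? c pvCharset.toList) = some vs) : ∀ v ∈ vs, v < 32 := by
  induction cs generalizing vs with
  | nil => simp at h; subst h; simp
  | cons c cs ih =>
    rw [List.mapM_cons] at h
    cases hidx : List.idxOf? c pvCharset.toList with
    | none => simp [hidx] at h
    | some v =>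
      cases hrest : cs.mapM (fun c => List.idxOf? c pvCharset.toList) with
      | none => simp [hidx, hrest] at h
      | some ws =>
        simp [hidx, hrest] at h
        subst h
        intro w hw
        rcases List.mem_cons.mp hw with h | h
        · exact h ▸ index_lt_32 (by simpa using hidx)
        · exact ih hrest w h

-- the heart: A's byte-list hex equals B's padded big-integer hex
lemma core (vs : List Nat) (hvs : ∀ v ∈ vs, v < 32) :
    bytesHexL (convertbits vs 5 8 false)
      = hexPadL ((vs.foldl (fun a v => (a <<< 5) ||| v) 0) >>> (5 * vs.length - 8 * ((5 * vs.length) / 8)))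
          (2 * ((5 * vs.length) / 8)) := by
  obtain ⟨h1, h2, h3, h4⟩ := conv_inv vs 0 0 [] hvs (by norm_num) (by simp [bytesHexL, hexPadL])
  simp only [List.length_nil, Nat.mul_zero, Nat.zero_add, Nat.add_zero] at h3
  have hL : (vs.foldl (cbStep 5 8 255) (0, 0, [])).2.2.length = (5 * vs.length) / 8 := by omega
  have hbit : (vs.foldl (cbStep 5 8 255) (0, 0, [])).2.1 = 5 * vs.length - 8 * ((5 * vs.length) / 8) := by omega
  have : convertbits vs 5 8 false = (vs.foldl (cbStep 5 8 255) (0, 0, [])).2.2 := by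
    simp [convertbits]
  rw [this, h4, h1, hL, hbit]

-- ===== VERDICT (by name: the statement is the Claim_ definition above) =====
theorem decode_bech32_py_spec : Claim_equal_decode_bech32_py := by
  intro hrp s _
  unfold Spec_decode_bech32_py decode_bech32_py decode_bech32_py_alt
  by_cases hc : PySem.Str.startswith s (hrp ++ "1") = false
  · rw [if_pos hc, if_pos hc]
  · rw [if_neg hc, if_neg hc]
    simp only [altLoop_eq, PySem.List.index?_eq_idxOf?]
    cases h : (PySem.List.slice (PySem.List.slice s.toList (some ((hrp.length : Int) + 1)) none) none
        (some (-6 : Int))).mapM (fun c => List.idxOf? c pvCharset.toList) with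
    | none => simp
    | some vs =>
      simp only [Option.map_some]
      rw [core vs (mapM_lt_32 h)]
      simp
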